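-- pv_equiv track=rewrite | github.com/grant-TraDA/named-entity-recognition-in-titles-of-e-commerce-products | datasets/english_wdc/programs/data_loader.py | compress_match_strings
-- ===== SOURCE A (Python) =====
-- def compress_match_strings(sentence, query, sep: str = ' '):
--     if not sentence or not query:
--         return []
--     clear_sentence = sentence.replace(sep, '').lower()
--     spaces_dp = [0] * len(clear_sentence)
--     query = query.replace(sep, '').lower()
--     curr = 0
--     dp_iter = 0
--     for idx in range(len(sentence)):
--         if sentence[idx] == sep:
--             curr += 1
--         else:
--             spaces_dp[dp_iter] = curr
--             dp_iter += 1
--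
--     # result = regex.search(f"({query})" + "{e<=3}", clear_sentence)
--     start = clear_sentence.find(query)
--     if start == -1:
--         return []
--     start = start
--     end = start + len(query)
--     results = list(set(spaces_dp[start:end]))
--     results = list(sorted(results))
--
--     return results
-- ===== SOURCE B (Python) =====
-- def compress_match_strings(sentence, query, sep: str = ' '):
--     if not sentence or not query:
--         return []
--     q = query.replace(sep, '').lower()
--     if not q:
--         return []
--     parts = sentence.split(sep) if sep else [sentence]
--     clear = ''.join(parts).lower()
--     start = clear.find(q)
--     if start == -1:
--         return []
--     end = start + len(q)
--     out = []
--     pos = 0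
--     for i, part in enumerate(parts):
--         if part and pos < end and pos + len(part) > start:
--             out.append(i)
--         pos += len(part)
--     return out
-- ===== Notes on version B (the rewrite author's own statement) =====
-- stated objective: alternative
-- what changed: B replaces A's preallocated per-character separator-count array (index-writing loop, then slice, set-dedup and sort) with a split(sep) segment scan: the i-th non-empty segment contributes its index i exactly when its interval overlaps the find-range, so the answer is emitted directly in increasing order with no count array, no set and no sort.
import Mathlib
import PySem

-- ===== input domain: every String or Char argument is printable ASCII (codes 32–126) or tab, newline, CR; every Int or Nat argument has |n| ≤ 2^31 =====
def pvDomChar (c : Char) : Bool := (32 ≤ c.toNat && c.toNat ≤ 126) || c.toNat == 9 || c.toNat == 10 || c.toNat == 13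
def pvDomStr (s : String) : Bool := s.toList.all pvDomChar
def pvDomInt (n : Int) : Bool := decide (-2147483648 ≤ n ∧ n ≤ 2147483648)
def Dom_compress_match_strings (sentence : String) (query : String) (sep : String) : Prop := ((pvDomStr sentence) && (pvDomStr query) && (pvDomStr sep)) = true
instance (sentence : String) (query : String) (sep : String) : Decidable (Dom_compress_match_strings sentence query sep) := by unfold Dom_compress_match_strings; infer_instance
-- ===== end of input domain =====

-- B replaces A's per-character separator-count array (filled, sliced, set-deduplicated, sorted)
-- with a split(sep) segment scan emitting overlapping segment indices directly in order (objective: alternative).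

-- ===== PORT A =====
def compress_match_strings (sentence : String) (query : String) (sep : String) : List Int :=
  if sentence.toList = [] ∨ query.toList = [] then []
  else
    let clear := PySem.Chars.lower (PySem.Chars.replace sentence.toList sep.toList [])
    let q := PySem.Chars.lower (PySem.Chars.replace query.toList sep.toList [])
    let st := sentence.toList.foldl
      (fun (s : Int × Nat × List Int) ch =>
        if [ch] = sep.toList then (s.1 + 1, s.2.1, s.2.2)
        else (s.1, s.2.1 + 1, s.2.2.set s.2.1 s.1))
      ((0 : Int), (0 : Nat), List.replicate clear.length (0 : Int))
    let start := PySem.Chars.find clear q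
    if start = -1 then []
    else
      let e := start + (q.length : Int)
      PySem.List.sorted (PySem.Set.ofList (PySem.List.slice st.2.2 (some start) (some e))) id

-- ===== PORT B =====
def compress_match_strings_alt (sentence : String) (query : String) (sep : String) : List Int :=
  if sentence.toList = [] ∨ query.toList = [] then []
  else
    let q := PySem.Chars.lower (PySem.Chars.replace query.toList sep.toList [])
    if q = [] then []
    else
      let parts : List (List Char) :=
        if sep.toList = [] then [sentence.toList]
        else PySem.Chars.splitOn sentence.toList sep.toList
      let clear := PySem.Chars.lower parts.flatten
      let start := PySem.Chars.find clear q
      if start = -1 then []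
      else
        let e := start + (q.length : Int)
        (parts.foldl
          (fun (s : Nat × Nat × List Int) part =>
            (s.1 + 1, s.2.1 + part.length,
             if part ≠ [] ∧ (s.2.1 : Int) < e ∧ (s.2.1 : Int) + (part.length : Int) > start
             then s.2.2 ++ [(s.1 : Int)] else s.2.2))
          ((0 : Nat), (0 : Nat), ([] : List Int))).2.2

-- ===== PRECONDITION & SPEC =====
-- Pre_ excludes exactly the inputs on which A raises IndexError: a separator of length ≥ 2
-- occurring in a non-empty sentence (with a non-empty query) makes A's count array shorter
-- than the number of characters it writes.
def Pre_compress_match_strings (sentence : String) (query : String) (sep : String) : Prop :=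
  sentence.toList = [] ∨ query.toList = [] ∨ sep.toList.length ≤ 1 ∨ PySem.Str.isIn sep sentence = false
instance (sentence : String) (query : String) (sep : String) : Decidable (Pre_compress_match_strings sentence query sep) := by unfold Pre_compress_match_strings; infer_instance
def pvWitness_compress_match_strings : String × String × String := ("a  bc d", "bc", " ")

def Spec_compress_match_strings (sentence : String) (query : String) (sep : String) (out : List Int) : Prop := out = compress_match_strings_alt sentence query sep
instance (sentence : String) (query : String) (sep : String) (out : List Int) : Decidable (Spec_compress_match_strings sentence query sep out) := by unfold Spec_compress_match_strings; infer_instance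

-- ===== CLAIM (what is proved, stated in full; the proofs are below) =====
def Claim_equal_compress_match_strings : Prop := ∀ (sentence : String) (query : String) (sep : String), Dom_compress_match_strings sentence query sep → Pre_compress_match_strings sentence query sep → Spec_compress_match_strings sentence query sep (compress_match_strings sentence query sep)
-- ===== LEMMAS AND PROOFS =====

theorem pv_replaceGo_single (c : Char) : ∀ (f : Nat) (l acc : List Char), l.length ≤ f →
    PySem.Chars.replace.go [c] [] f l acc = acc.reverse ++ l.filter (· ≠ c) := by
  intro f
  induction f with
  | zero =>
    intro l acc h
    have hl : l = [] := List.eq_nil_of_length_eq_zero (Nat.le_zero.mp h)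
    subst hl; simp [PySem.Chars.replace.go]
  | succ f ih =>
    intro l acc h
    cases l with
    | nil => simp [PySem.Chars.replace.go]
    | cons x t =>
      by_cases hx : x = c
      · subst hx
        rw [show PySem.Chars.replace.go [x] [] (f+1) (x::t) acc = PySem.Chars.replace.go [x] [] f t acc by
          simp [PySem.Chars.replace.go, List.isPrefixOf]]
        rw [ih t acc (by simpa using h)]
        simp
      · have hx' : ¬ c = x := fun hh => hx hh.symm
        rw [show PySem.Chars.replace.go [c] [] (f+1) (x::t) acc = PySem.Chars.replace.go [c] [] f t (x::acc) by
          simp [PySem.Chars.replace.go, List.isPrefixOf, hx']]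
        rw [ih t (x::acc) (by simpa using h)]
        simp [hx]
theorem pv_replace_single (c : Char) (s : List Char) :
    PySem.Chars.replace s [c] [] = s.filter (· ≠ c) := by
  rw [PySem.Chars.replace]
  simpa using pv_replaceGo_single c s.length s [] le_rfl
theorem pv_replaceGo_noocc (p : List Char) (hp : p ≠ []) : ∀ (f : Nat) (l acc : List Char), l.length ≤ f →
    ¬ p <:+: l → PySem.Chars.replace.go p [] f l acc = acc.reverse ++ l := by
  intro f
  induction f with
  | zero =>
    intro l acc h _
    have hl : l = [] := List.eq_nil_of_length_eq_zero (Nat.le_zero.mp h)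
    subst hl; simp [PySem.Chars.replace.go]
  | succ f ih =>
    intro l acc h hocc
    cases l with
    | nil => simp [PySem.Chars.replace.go]
    | cons x t =>
      have hpre : p.isPrefixOf (x::t) = false := by
        rw [Bool.eq_false_iff]
        intro hc
        exact hocc ((List.isPrefixOf_iff_prefix.mp hc).isInfix)
      rw [show PySem.Chars.replace.go p [] (f+1) (x::t) acc = PySem.Chars.replace.go p [] f t (x::acc) by
        simp [PySem.Chars.replace.go, hpre]]
      rw [ih t (x::acc) (by simpa using h) (fun hi => hocc (hi.trans (t.suffix_cons x).isInfix))]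
      simp

theorem pv_replace_noocc (p s : List Char) (hp : p ≠ []) (h : ¬ p <:+: s) :
    PySem.Chars.replace s p [] = s := by
  rw [PySem.Chars.replace]
  rw [if_neg (by simpa using hp)]
  simpa using pv_replaceGo_noocc p hp s.length s [] le_rfl h

theorem pv_replace_nil (s : List Char) : PySem.Chars.replace s [] [] = s := by
  rw [PySem.Chars.replace]
  simp

def pvSplitRest (c : Char) : List Char → List Char → List (List Char)
  | [], cur => [cur.reverse]
  | x :: t, cur => if x = c then cur.reverse :: pvSplitRest c t [] else pvSplitRest c t (x :: cur)

theorem pv_splitGo_single (c : Char) : ∀ (f : Nat) (l cur : List Char) (acc : List (List Char)),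
    l.length ≤ f →
    PySem.Chars.splitOn.go [c] f l cur acc = acc.reverse ++ pvSplitRest c l cur := by
  intro f
  induction f with
  | zero =>
    intro l cur acc h
    have hl : l = [] := List.eq_nil_of_length_eq_zero (Nat.le_zero.mp h)
    subst hl; simp [PySem.Chars.splitOn.go, pvSplitRest]
  | succ f ih =>
    intro l cur acc h
    cases l with
    | nil => simp [PySem.Chars.splitOn.go, pvSplitRest]
    | cons x t =>
      by_cases hx : x = c
      · subst hx
        rw [show PySem.Chars.splitOn.go [x] (f+1) (x::t) cur acc
              = PySem.Chars.splitOn.go [x] f t [] (cur.reverse :: acc) by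
          simp [PySem.Chars.splitOn.go, List.isPrefixOf]]
        rw [ih t [] (cur.reverse :: acc) (by simpa using h)]
        simp [pvSplitRest]
      · have hx' : ¬ c = x := fun hh => hx hh.symm
        rw [show PySem.Chars.splitOn.go [c] (f+1) (x::t) cur acc
              = PySem.Chars.splitOn.go [c] f t (x :: cur) acc by
          simp [PySem.Chars.splitOn.go, List.isPrefixOf, hx']]
        rw [ih t (x::cur) acc (by simpa using h)]
        simp [pvSplitRest, hx]

theorem pv_splitOn_single (c : Char) (s : List Char) :
    PySem.Chars.splitOn s [c] = pvSplitRest c s [] := by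
  rw [PySem.Chars.splitOn]
  simpa using pv_splitGo_single c (s.length + 1) s [] [] (by omega)

theorem pv_splitGo_noocc (p : List Char) : ∀ (f : Nat) (l cur : List Char) (acc : List (List Char)),
    l.length ≤ f → ¬ p <:+: l →
    PySem.Chars.splitOn.go p f l cur acc = acc.reverse ++ [cur.reverse ++ l] := by
  intro f
  induction f with
  | zero =>
    intro l cur acc h _
    have hl : l = [] := List.eq_nil_of_length_eq_zero (Nat.le_zero.mp h)
    subst hl; simp [PySem.Chars.splitOn.go]
  | succ f ih =>
    intro l cur acc h hocc
    cases l with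
    | nil => simp [PySem.Chars.splitOn.go]
    | cons x t =>
      have hpre : p.isPrefixOf (x::t) = false := by
        rw [Bool.eq_false_iff]; intro hc
        exact hocc ((List.isPrefixOf_iff_prefix.mp hc).isInfix)
      rw [show PySem.Chars.splitOn.go p (f+1) (x::t) cur acc
            = PySem.Chars.splitOn.go p f t (x :: cur) acc by
        simp [PySem.Chars.splitOn.go, hpre]]
      rw [ih t (x::cur) acc (by simpa using h) (fun hi => hocc (hi.trans (t.suffix_cons x).isInfix))]
      simp

theorem pv_splitOn_noocc (p s : List Char) (h : ¬ p <:+: s) :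
    PySem.Chars.splitOn s p = [s] := by
  rw [PySem.Chars.splitOn]
  simpa using pv_splitGo_noocc p (s.length + 1) s [] [] (by omega) h

theorem pv_flatten_splitRest (c : Char) : ∀ (l cur : List Char),
    (pvSplitRest c l cur).flatten = cur.reverse ++ l.filter (· ≠ c) := by
  intro l
  induction l with
  | nil => intro cur; simp [pvSplitRest]
  | cons x t ih =>
    intro cur
    by_cases hx : x = c
    · subst hx; simp [pvSplitRest, ih]
    · simp [pvSplitRest, hx, ih (x :: cur)]

theorem pv_splitRest_shift (c : Char) : ∀ (l cur : List Char),
    ∃ p ps, pvSplitRest c l [] = p :: ps ∧ pvSplitRest c l cur = (cur.reverse ++ p) :: ps := by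
  intro l
  induction l with
  | nil => intro cur; exact ⟨[], [], by simp [pvSplitRest]⟩
  | cons x t ih =>
    intro cur
    by_cases hx : x = c
    · subst hx; exact ⟨[], pvSplitRest x t [], by simp [pvSplitRest]⟩
    · obtain ⟨p, ps, h1, -⟩ := ih []
      obtain ⟨p1, ps1, h1', h2'⟩ := ih (x :: cur)
      obtain ⟨p2, ps2, h1'', h2''⟩ := ih [x]
      rw [h1] at h1'; rw [h1] at h1''
      cases h1'; cases h1''
      refine ⟨x :: p, ps, ?_, ?_⟩
      · simp [pvSplitRest, hx]; rw [h2'']; simp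
      · simp [pvSplitRest, hx]; rw [h2']; simp

def pvDpList (c : Char) : List Char → Nat → List Int
  | [], _ => []
  | x :: t, k => if x = c then pvDpList c t (k + 1) else (k : Int) :: pvDpList c t k

def pvSegFlat : Nat → List (List Char) → List Int
  | _, [] => []
  | k, p :: ps => List.replicate p.length (k : Int) ++ pvSegFlat (k + 1) ps

def pvSel : List (List Char) → Nat → Nat → Nat → List Int
  | [], _, _, _ => []
  | p :: ps, k, st, en =>
      (if p ≠ [] ∧ st < p.length ∧ 0 < en then [(k : Int)] else [])
        ++ pvSel ps (k + 1) (st - p.length) (en - p.length)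

def pvSelAbs (start e : Int) : List (List Char) → Nat → Nat → List Int
  | [], _, _ => []
  | p :: ps, k, pos =>
      (if p ≠ [] ∧ (pos : Int) < e ∧ (pos : Int) + (p.length : Int) > start then [(k : Int)] else [])
        ++ pvSelAbs start e ps (k + 1) (pos + p.length)

theorem pv_dpList_segFlat (c : Char) : ∀ (l : List Char) (k : Nat),
    pvDpList c l k = pvSegFlat k (pvSplitRest c l []) := by
  intro l
  induction l with
  | nil => intro k; simp [pvDpList, pvSplitRest, pvSegFlat]
  | cons x t ih =>
    intro k
    by_cases hx : x = c
    · subst hx; simp [pvDpList, pvSplitRest, pvSegFlat, ih]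
    · obtain ⟨p, ps, h1, h2⟩ := pv_splitRest_shift c t [x]
      simp only [pvDpList, pvSplitRest, hx, if_neg hx, if_false]
      rw [ih k, h1, h2]
      simp [pvSegFlat, List.replicate_succ]

theorem pv_foldA_single (c : Char) : ∀ (l : List Char) (k : Nat) (w : List Int),
    l.foldl
      (fun (s : Int × Nat × List Int) ch =>
        if [ch] = [c] then (s.1 + 1, s.2.1, s.2.2)
        else (s.1, s.2.1 + 1, s.2.2.set s.2.1 s.1))
      ((k : Int), w.length, w ++ List.replicate (l.filter (· ≠ c)).length (0 : Int))
    = (((k + l.count c : Nat) : Int), w.length + (l.filter (· ≠ c)).length,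
       w ++ pvDpList c l k) := by
  intro l
  induction l with
  | nil => intro k w; simp [pvDpList]
  | cons x t ih =>
    intro k w
    by_cases hx : x = c
    · subst hx
      have hfil : List.filter (· ≠ x) (x :: t) = List.filter (· ≠ x) t := by simp
      rw [hfil]
      simp only [List.foldl_cons]
      rw [if_pos trivial]
      have hc : ((k : Int) + 1) = ((k + 1 : Nat) : Int) := by push_cast; ring
      rw [hc, ih (k + 1) w]
      refine Prod.ext ?_ (Prod.ext ?_ ?_)
      · simp [List.count_cons]; omega
      · simp
      · simp [pvDpList]
    · have hne : ¬ ([x] = [c]) := by simpa using hx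
      have hfil : List.filter (· ≠ c) (x :: t) = x :: List.filter (· ≠ c) t := by simp [hx]
      rw [hfil]
      simp only [List.foldl_cons]
      rw [if_neg hne]
      have hset : (w ++ List.replicate (x :: List.filter (· ≠ c) t).length (0:Int)).set w.length (k : Int)
          = (w ++ [(k:Int)]) ++ List.replicate (List.filter (· ≠ c) t).length (0:Int) := by
        simp only [List.length_cons, List.replicate_succ, List.set_append]
        simp
      rw [hset]
      have hlen : w.length + 1 = (w ++ [(k:Int)]).length := by simp
      rw [hlen, ih k (w ++ [(k:Int)])]
      refine Prod.ext ?_ (Prod.ext ?_ ?_)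
      · simp [List.count_cons, hx]
      · simp; omega
      · simp [pvDpList, hx]

theorem pv_foldA_noocc (p : List Char) : ∀ (l : List Char) (w : List Int),
    (∀ ch ∈ l, [ch] ≠ p) →
    l.foldl
      (fun (s : Int × Nat × List Int) ch =>
        if [ch] = p then (s.1 + 1, s.2.1, s.2.2)
        else (s.1, s.2.1 + 1, s.2.2.set s.2.1 s.1))
      ((0 : Int), w.length, w ++ List.replicate l.length (0 : Int))
    = ((0 : Int), w.length + l.length, w ++ List.replicate l.length (0 : Int)) := by
  intro l
  induction l with
  | nil => intro w _; simp
  | cons x t ih =>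
    intro w hall
    simp only [List.foldl_cons]
    rw [if_neg (hall x (by simp))]
    have hset : (w ++ List.replicate (x :: t).length (0:Int)).set w.length (0 : Int)
        = (w ++ [(0:Int)]) ++ List.replicate t.length (0:Int) := by
      simp only [List.length_cons, List.replicate_succ, List.set_append]
      simp
    rw [hset]
    have hlen : w.length + 1 = (w ++ [(0:Int)]).length := by simp
    rw [hlen, ih (w ++ [(0:Int)]) (fun ch hc => hall ch (by simp [hc]))]
    refine Prod.ext rfl (Prod.ext ?_ ?_)
    · simp; omega
    · simp [List.replicate_succ]

theorem pv_mem_segFlat_ge : ∀ (ps : List (List Char)) (k : Nat) (x : Int),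
    x ∈ pvSegFlat k ps → (k : Int) ≤ x := by
  intro ps
  induction ps with
  | nil => intro k x h; simp [pvSegFlat] at h
  | cons p t ih =>
    intro k x h
    simp only [pvSegFlat, List.mem_append] at h
    rcases h with h | h
    · simp [List.eq_of_mem_replicate h]
    · have := ih (k+1) x h; push_cast at this ⊢; omega

theorem pv_mem_sel_ge : ∀ (ps : List (List Char)) (k st en : Nat) (x : Int),
    x ∈ pvSel ps k st en → (k : Int) ≤ x := by
  intro ps
  induction ps with
  | nil => intro k st en x h; simp [pvSel] at h
  | cons p t ih =>
    intro k st en x h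
    simp only [pvSel, List.mem_append] at h
    rcases h with h | h
    · split at h <;> simp_all
    · have := ih (k+1) _ _ x h; push_cast at this ⊢; omega

theorem pv_sel_pairwise : ∀ (ps : List (List Char)) (k st en : Nat),
    List.Pairwise (· < ·) (pvSel ps k st en) := by
  intro ps
  induction ps with
  | nil => intro k st en; simp [pvSel]
  | cons p t ih =>
    intro k st en
    simp only [pvSel]
    refine List.pairwise_append.mpr ⟨?_, ih (k+1) _ _, ?_⟩
    · split <;> simp
    · intro a ha b hb
      have hb' := pv_mem_sel_ge t (k+1) _ _ b hb
      have ha' : a = (k : Int) := by split at ha <;> simp_all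
      subst ha'; push_cast at hb' ⊢; omega

theorem pv_sel_en_zero : ∀ (ps : List (List Char)) (k st : Nat), pvSel ps k st 0 = [] := by
  intro ps
  induction ps with
  | nil => intro k st; simp [pvSel]
  | cons p t ih => intro k st; simp [pvSel, ih]

theorem pv_foldl_add_cons (a : Int) : ∀ (r : List Int) (acc : List Int), (∀ y ∈ r, y ≠ a) →
    List.foldl PySem.Set.add (a :: acc) r = a :: List.foldl PySem.Set.add acc r := by
  intro r
  induction r with
  | nil => intro acc _; rfl
  | cons y t ih =>
    intro acc hall
    simp only [List.foldl_cons]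
    have hya : (y == a) = false := by simp [hall y (by simp)]
    have : PySem.Set.add (a :: acc) y = a :: PySem.Set.add acc y := by
      simp only [PySem.Set.add, PySem.Set.contains, List.contains_cons, hya, Bool.false_or]
      split <;> simp
    rw [this, ih (PySem.Set.add acc y) (fun z hz => hall z (by simp [hz]))]

theorem pv_foldl_add_replicate (a : Int) : ∀ (m : Nat) (acc : List Int), acc.contains a = true →
    List.foldl PySem.Set.add acc (List.replicate m a) = acc := by
  intro m
  induction m with
  | zero => intro acc _; rfl
  | succ m ih =>
    intro acc h
    simp only [List.replicate_succ, List.foldl_cons]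
    rw [show PySem.Set.add acc a = acc by simp [PySem.Set.add, PySem.Set.contains]; simpa using h]
    exact ih acc h

theorem pv_main : ∀ (parts : List (List Char)) (k st en : Nat), st < en →
    PySem.Set.ofList (((pvSegFlat k parts).drop st).take (en - st)) = pvSel parts k st en := by
  intro parts
  induction parts with
  | nil => intro k st en _; simp [pvSegFlat, pvSel, PySem.Set.ofList, PySem.Set.empty]
  | cons p ps ih =>
    intro k st en hlt
    set n := p.length with hn
    have hslice : ((pvSegFlat k (p :: ps)).drop st).take (en - st)
        = List.replicate (min (en - st) (n - st)) (k : Int)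
          ++ ((pvSegFlat (k+1) ps).drop (st - n)).take ((en - n) - (st - n)) := by
      simp only [pvSegFlat, List.drop_append, List.take_append,
        List.drop_replicate, List.take_replicate, List.length_replicate, List.length_drop]
      congr 2 <;> omega
    rw [hslice]
    by_cases hst : st < n
    · -- head run overlaps
      have hp : p ≠ [] := by intro h; rw [h] at hn; simp at hn; omega
      have hm : min (en - st) (n - st) = (min (en - st) (n - st) - 1) + 1 := by omega
      have hofh : ∀ r2 : List Int, (∀ y ∈ r2, y ≠ (k:Int)) →
          PySem.Set.ofList (List.replicate (min (en - st) (n - st)) (k : Int) ++ r2)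
            = (k:Int) :: PySem.Set.ofList r2 := by
        intro r2 h2
        unfold PySem.Set.ofList
        rw [List.foldl_append, hm, List.replicate_succ, List.foldl_cons]
        rw [show PySem.Set.add PySem.Set.empty (k:Int) = [(k:Int)] from rfl]
        rw [pv_foldl_add_replicate _ _ _ (by simp)]
        exact pv_foldl_add_cons _ _ _ h2
      have hr2mem : ∀ y ∈ ((pvSegFlat (k+1) ps).drop (st - n)).take ((en - n) - (st - n)), y ≠ (k:Int) := by
        intro y hy
        have : y ∈ pvSegFlat (k+1) ps := List.mem_of_mem_drop (List.mem_of_mem_take hy)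
        have := pv_mem_segFlat_ge ps (k+1) y this
        push_cast at this; omega
      rw [hofh _ hr2mem]
      by_cases hen : en ≤ n
      · have : (en - n) - (st - n) = 0 := by omega
        rw [this]
        simp only [List.take_zero]
        rw [show pvSel (p :: ps) k st en
              = (k:Int) :: pvSel ps (k+1) (st - p.length) (en - p.length) by
          simp only [pvSel]
          rw [if_pos ⟨hp, hst, by omega⟩]
          rfl]
        rw [show en - p.length = 0 by omega, pv_sel_en_zero]
        simp [PySem.Set.ofList, PySem.Set.empty]
      · rw [ih (k+1) (st - n) (en - n) (by omega)]
        simp only [pvSel]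
        rw [if_pos ⟨hp, hst, by omega⟩]
        rfl
    · -- head run fully before the window
      have : min (en - st) (n - st) = 0 := by omega
      rw [this]
      simp only [List.replicate_zero, List.nil_append]
      rw [ih (k+1) (st - n) (en - n) (by omega)]
      simp only [pvSel]
      rw [if_neg (fun hc => absurd hc.2.1 (by omega))]
      rfl

theorem pv_foldB (start e : Int) : ∀ (parts : List (List Char)) (i pos : Nat) (out : List Int),
    (parts.foldl
      (fun (s : Nat × Nat × List Int) part =>
        (s.1 + 1, s.2.1 + part.length,
         if part ≠ [] ∧ (s.2.1 : Int) < e ∧ (s.2.1 : Int) + (part.length : Int) > start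
         then s.2.2 ++ [(s.1 : Int)] else s.2.2))
      (i, pos, out)).2.2 = out ++ pvSelAbs start e parts i pos := by
  intro parts
  induction parts with
  | nil => intro i pos out; simp [pvSelAbs]
  | cons p ps ih =>
    intro i pos out
    simp only [List.foldl_cons]
    by_cases hc : p ≠ [] ∧ (pos : Int) < e ∧ (pos : Int) + (p.length : Int) > start
    · rw [show (if p ≠ [] ∧ ((pos:Nat) : Int) < e ∧ ((pos:Nat) : Int) + (p.length : Int) > start
            then out ++ [(i : Int)] else out) = out ++ [(i : Int)] from if_pos hc]
      rw [ih (i+1) (pos + p.length) (out ++ [(i:Int)])]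
      simp only [pvSelAbs]
      rw [if_pos hc]
      simp
    · rw [if_neg hc, ih (i+1) (pos + p.length) out]
      simp only [pvSelAbs]
      rw [if_neg hc]
      simp

theorem pv_selAbs_eq_sel (st qlen : Nat) : ∀ (parts : List (List Char)) (k pos : Nat),
    pvSelAbs (st : Int) ((st : Int) + (qlen : Int)) parts k pos
      = pvSel parts k (st - pos) (st + qlen - pos) := by
  intro parts
  induction parts with
  | nil => intro k pos; simp [pvSelAbs, pvSel]
  | cons p ps ih =>
    intro k pos
    simp only [pvSelAbs, pvSel]
    have hiff : (p ≠ [] ∧ (pos : Int) < (st:Int) + (qlen:Int) ∧ (pos : Int) + (p.length : Int) > (st:Int))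
        ↔ (p ≠ [] ∧ st - pos < p.length ∧ 0 < st + qlen - pos) := by
      constructor
      all_goals rintro ⟨h1, h2, h3⟩
      all_goals have hlp : 1 ≤ p.length := List.length_pos_iff.mpr h1
      all_goals refine ⟨h1, by omega, by omega⟩
    rw [ih (k+1) (pos + p.length)]
    rw [show st - (pos + p.length) = st - pos - p.length by omega,
        show st + qlen - (pos + p.length) = st + qlen - pos - p.length by omega]
    congr 1
    simp only [hiff]

theorem pv_lower_length (s : List Char) : (PySem.Chars.lower s).length = s.length := by
  simp [PySem.Chars.lower]

theorem pv_tail (qr : List Char) (parts : List (List Char)) (start : Int)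
    (h0 : 0 ≤ start) (hq : qr ≠ []) :
    PySem.List.sorted (PySem.Set.ofList (PySem.List.slice (pvSegFlat 0 parts) (some start) (some (start + (qr.length : Int))))) id
      = (parts.foldl
          (fun (s : Nat × Nat × List Int) part =>
            (s.1 + 1, s.2.1 + part.length,
             if part ≠ [] ∧ (s.2.1 : Int) < start + (qr.length : Int) ∧ (s.2.1 : Int) + (part.length : Int) > start
             then s.2.2 ++ [(s.1 : Int)] else s.2.2))
          ((0 : Nat), (0 : Nat), ([] : List Int))).2.2 := by
  obtain ⟨st, rfl⟩ : ∃ st : Nat, start = (st : Int) := ⟨start.toNat, (Int.toNat_of_nonneg h0).symm⟩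
  rw [pv_foldB, pv_selAbs_eq_sel]
  have hql : 1 ≤ qr.length := List.length_pos_iff.mpr hq
  rw [show ((st : Int) + (qr.length : Int)) = ((st + qr.length : Nat) : Int) by push_cast; ring]
  rw [PySem.List.slice_natCast]
  rw [pv_main parts 0 st (st + qr.length) (by omega)]
  simp only [Nat.sub_zero, List.nil_append]
  exact PySem.List.sorted_eq_of_perm_of_pairwise_lt _ _ id (List.Perm.refl _)
    (by simpa using pv_sel_pairwise parts 0 st (st + qr.length))

theorem pv_endtail (qr : List Char) (parts : List (List Char)) (dp : List Int) (C : List Char)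
    (hdp : dp = pvSegFlat 0 parts) (hq : qr ≠ []) :
    (if PySem.Chars.find C qr = -1 then ([] : List Int)
     else PySem.List.sorted (PySem.Set.ofList (PySem.List.slice dp (some (PySem.Chars.find C qr)) (some (PySem.Chars.find C qr + (qr.length : Int))))) id)
    = (if PySem.Chars.find C qr = -1 then ([] : List Int)
       else (parts.foldl (fun (s : Nat × Nat × List Int) part =>
              (s.1 + 1, s.2.1 + part.length,
               if part ≠ [] ∧ (s.2.1 : Int) < PySem.Chars.find C qr + (qr.length : Int) ∧ (s.2.1 : Int) + (part.length : Int) > PySem.Chars.find C qr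
               then s.2.2 ++ [(s.1 : Int)] else s.2.2)) ((0 : Nat), (0 : Nat), ([] : List Int))).2.2) := by
  subst hdp
  by_cases hf : PySem.Chars.find C qr = -1
  · rw [if_pos hf, if_pos hf]
  · rw [if_neg hf, if_neg hf]
    exact pv_tail qr parts _ (by have := PySem.Chars.neg_one_le_find C qr; omega) hq

-- ===== VERDICT (by name: the statement is the Claim_ definition above) =====
theorem compress_match_strings_spec : Claim_equal_compress_match_strings := by
  intro sentence query sep hdom hpre
  unfold Spec_compress_match_strings compress_match_strings compress_match_strings_alt
  by_cases hg : sentence.toList = [] ∨ query.toList = []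
  · rw [if_pos hg, if_pos hg]
  · rw [if_neg hg, if_neg hg]
    by_cases hq : PySem.Chars.lower (PySem.Chars.replace query.toList sep.toList []) = []
    · simp only [hq, if_pos rfl, PySem.Chars.find_nil, List.length_nil, Nat.cast_zero, add_zero]
      rw [if_neg (by decide), if_pos trivial]
      have hsl : ∀ dp : List Int, PySem.List.slice dp (some (0:Int)) (some (0:Int)) = [] := by
        intro dp
        simpa using PySem.List.slice_natCast dp 0 0
      rw [hsl]
      rfl
    · rcases hsep : sep.toList with _ | ⟨c, rest⟩
      · -- sep is the empty string
        simp only [hsep, pv_replace_nil] at hq ⊢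
        simp only [reduceIte, List.flatten_cons, List.flatten_nil, List.append_nil, if_neg hq]
        have hdp := pv_foldA_noocc [] sentence.toList [] (by intro ch _; simp)
        simp only [List.length_nil, List.nil_append, Nat.zero_add] at hdp
        rw [← pv_lower_length sentence.toList] at hdp
        simp only [hdp]
        exact pv_endtail (PySem.Chars.lower query.toList) [sentence.toList] _ _
          (by simp [pvSegFlat, pv_lower_length]) hq
      · rcases rest with _ | ⟨c2, rest2⟩
        · -- single-character separator
          simp only [hsep, pv_replace_single] at hq ⊢
          simp only [if_neg (show (c :: ([] : List Char)) ≠ [] by simp), if_neg hq]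
          rw [pv_splitOn_single c sentence.toList]
          simp only [pv_flatten_splitRest, List.reverse_nil, List.nil_append]
          have hdp := pv_foldA_single c sentence.toList 0 []
          simp only [Nat.cast_zero, List.length_nil, List.nil_append, Nat.zero_add] at hdp
          rw [← pv_lower_length (sentence.toList.filter (· ≠ c))] at hdp
          simp only [hdp]
          exact pv_endtail (PySem.Chars.lower (List.filter (· ≠ c) query.toList))
            (pvSplitRest c sentence.toList []) _ _ (pv_dpList_segFlat c sentence.toList 0) hq
        · -- separator of length ≥ 2 not occurring in the sentence (by Pre_)
          have hocc : ¬ sep.toList <:+: sentence.toList := by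
            rcases hpre with h | h | h | h
            · exact absurd (Or.inl h) hg
            · exact absurd (Or.inr h) hg
            · rw [hsep] at h; simp at h
            · rw [PySem.Str.isIn_eq] at h
              exact (PySem.Chars.isIn_eq_false_iff _ _).mp h
          rw [hsep] at hocc
          have hP : (c :: c2 :: rest2 : List Char) ≠ [] := by simp
          simp only [hsep] at hq ⊢
          simp only [pv_replace_noocc (c :: c2 :: rest2) sentence.toList hP hocc]
          simp only [if_neg hP, if_neg hq, pv_splitOn_noocc _ _ hocc, List.flatten_cons,
            List.flatten_nil, List.append_nil]
          have hdp := pv_foldA_noocc (c :: c2 :: rest2) sentence.toList [] (by intro ch _; simp)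
          simp only [List.length_nil, List.nil_append, Nat.zero_add] at hdp
          rw [← pv_lower_length sentence.toList] at hdp
          simp only [hdp]
          exact pv_endtail _ [sentence.toList] _ _ (by simp [pvSegFlat, pv_lower_length]) hq
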